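-- pv_equiv track=rewrite | github.com/adrielli-alves/ciencia-computacao-python | Semana 8 - Listas/temperatura.py | menor
-- ===== SOURCE A (Python) =====
-- def menor(temperatura):
--     menortemp = 100
--     for comparativo in temperatura:
--         if comparativo < menortemp:
--             menortemp = comparativo
--     diacerto = 0
--     for dia in range(len(temperatura)):
--         if temperatura[dia] == menortemp:
--             diacerto = dia + 1
--     return 'A menor temperatura foi de ', menortemp,'ºC, no dia', diacerto
-- ===== SOURCE B (Python) =====
-- def menor(temperatura):
--     menortemp = 100
--     diacerto = 0
--     for i, t in enumerate(temperatura):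
--         if t < menortemp:
--             menortemp = t
--             diacerto = i + 1
--         elif t == menortemp:
--             diacerto = i + 1
--     return 'A menor temperatura foi de ', menortemp, 'ºC, no dia', diacerto
-- ===== Notes on version B (the rewrite author's own statement) =====
-- stated objective: simpler
-- what changed: B fuses A's two scans (min pass, then index-loop for the last day of the min) into one enumerate pass maintaining (current min, last day it was seen), keeping the 100 sentinel and last-occurrence tie-break.
import Mathlib
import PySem

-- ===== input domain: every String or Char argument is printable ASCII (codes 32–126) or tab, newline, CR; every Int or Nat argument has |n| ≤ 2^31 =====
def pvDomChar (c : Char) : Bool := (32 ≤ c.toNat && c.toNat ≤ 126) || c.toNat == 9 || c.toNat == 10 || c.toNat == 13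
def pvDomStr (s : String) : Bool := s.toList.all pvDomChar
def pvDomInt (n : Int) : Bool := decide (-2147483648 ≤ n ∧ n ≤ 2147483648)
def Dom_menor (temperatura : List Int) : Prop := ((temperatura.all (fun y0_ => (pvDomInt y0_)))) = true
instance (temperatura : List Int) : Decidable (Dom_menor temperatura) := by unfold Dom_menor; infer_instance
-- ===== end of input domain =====

-- B fuses A's two scans (min pass, then a second index loop for the last day the min occurred)
-- into one enumerate pass carrying (current min, last day it was seen); objective: simpler.

-- ===== PORT A =====
def menor (temperatura : List Int) : String × Int × String × Int :=
  let menortemp := temperatura.foldl (fun m comparativo => if comparativo < m then comparativo else m) 100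
  let diacerto := (PySem.List.pyRange 0 temperatura.length 1).foldl
    (fun d dia => if PySem.List.pyGetD temperatura dia 0 = menortemp then dia + 1 else d) 0
  -- temperatura[dia] ported as pyGetD: dia ∈ range(len) is always in range, so the default is never used
  ("A menor temperatura foi de ", menortemp, "ºC, no dia", diacerto)

-- ===== PORT B =====
def menor_alt (temperatura : List Int) : String × Int × String × Int :=
  let st := (PySem.List.enumerate temperatura 0).foldl
    (fun (st : Int × Int) p =>
      if p.2 < st.1 then (p.2, p.1 + 1)
      else if p.2 = st.1 then (st.1, p.1 + 1)
      else st) (100, 0)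
  ("A menor temperatura foi de ", st.1, "ºC, no dia", st.2)

-- ===== PRECONDITION & SPEC =====
def Spec_menor (temperatura : List Int) (out : String × Int × String × Int) : Prop := out = menor_alt temperatura
instance (temperatura : List Int) (out : String × Int × String × Int) : Decidable (Spec_menor temperatura out) := by unfold Spec_menor; infer_instance

-- ===== CLAIM (what is proved, stated in full; the proofs are below) =====
def Claim_equal_menor : Prop := ∀ (temperatura : List Int), Dom_menor temperatura → Spec_menor temperatura (menor temperatura)

-- ===== LEMMAS AND PROOFS =====

def runMin (l : List Int) : Int := l.foldl (fun m c => if c < m then c else m) 100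

def dayOf (l : List Int) (m : Int) : Int :=
  (PySem.List.pyRange 0 l.length 1).foldl
    (fun d dia => if PySem.List.pyGetD l dia 0 = m then dia + 1 else d) 0

def bfold (l : List Int) : Int × Int :=
  (PySem.List.enumerate l 0).foldl
    (fun (st : Int × Int) p =>
      if p.2 < st.1 then (p.2, p.1 + 1)
      else if p.2 = st.1 then (st.1, p.1 + 1)
      else st) (100, 0)

theorem runMin_append (l : List Int) (x : Int) :
    runMin (l ++ [x]) = if x < runMin l then x else runMin l := by
  simp [runMin, List.foldl_append]

theorem dayOf_append (l : List Int) (x m : Int) :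
    dayOf (l ++ [x]) m = if x = m then (l.length : Int) + 1 else dayOf l m := by
  unfold dayOf
  have hlen : ((l ++ [x]).length : Int) = (l.length : Int) + 1 := by simp
  rw [hlen, PySem.List.pyRange_one_succ_right (by positivity : (0:Int) ≤ (l.length : Int)),
      List.foldl_append]
  have hget : PySem.List.pyGetD (l ++ [x]) (l.length : Int) 0 = x := by
    rw [PySem.List.pyGetD_eq_getElem _ 0 (by positivity) (by simp)]
    simp
  have hcongr :
      (PySem.List.pyRange 0 (l.length : Int) 1).foldl
        (fun d dia => if PySem.List.pyGetD (l ++ [x]) dia 0 = m then dia + 1 else d) 0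
      = (PySem.List.pyRange 0 (l.length : Int) 1).foldl
        (fun d dia => if PySem.List.pyGetD l dia 0 = m then dia + 1 else d) 0 := by
    apply PySem.List.foldl_congr_mem
    intro acc dia hdia
    have hb := (PySem.List.mem_pyRange_one).mp hdia
    obtain ⟨hb1, hb2⟩ := (PySem.List.mem_pyRange_one).mp hdia
    have hlt : dia.toNat < l.length := by omega
    rw [PySem.List.pyGetD_eq_getElem _ 0 hb1 (by simp; omega),
        PySem.List.pyGetD_eq_getElem _ 0 hb1 hb2]
    congr 1
    rw [List.getElem_append_left hlt]
  simp only [List.foldl_cons, List.foldl_nil, hcongr, hget]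

theorem bfold_eq (l : List Int) : bfold l = (runMin l, dayOf l (runMin l)) := by
  induction l using List.reverseRecOn with
  | nil => decide
  | append_singleton l x ih =>
    unfold bfold
    rw [PySem.List.enumerate_append, List.foldl_append]
    have : (PySem.List.enumerate l 0).foldl
        (fun (st : Int × Int) p =>
          if p.2 < st.1 then (p.2, p.1 + 1)
          else if p.2 = st.1 then (st.1, p.1 + 1)
          else st) (100, 0) = (runMin l, dayOf l (runMin l)) := ih
    rw [this]
    simp only [PySem.List.enumerate_cons, PySem.List.enumerate_nil,
      List.foldl_cons, List.foldl_nil, runMin_append, dayOf_append]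
    by_cases h1 : x < runMin l
    · simp [h1]
    · by_cases h2 : x = runMin l
      · simp [h2]
      · simp [h1, h2]

theorem menor_eq (l : List Int) :
    menor l = ("A menor temperatura foi de ", runMin l, "ºC, no dia", dayOf l (runMin l)) := rfl

theorem menor_alt_eq (l : List Int) :
    menor_alt l = ("A menor temperatura foi de ", (bfold l).1, "ºC, no dia", (bfold l).2) := rfl

-- ===== VERDICT (by name: the statement is the Claim_ definition above) =====
theorem menor_spec : Claim_equal_menor := by
  intro l _
  unfold Spec_menor
  rw [menor_eq, menor_alt_eq, bfold_eq]
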